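-- pv_equiv track=rewrite | github.com/ZINA312/IGI_labs | IGI/LR3/Task5.py | SumOfElemsBetweenNegatives
-- ===== SOURCE A (Python) =====
-- def SumOfElemsBetweenNegatives(lst : list) -> float:
--     '''
--     Calculates the sum of the list items located between the first and last negative elements.
--         Args:
--             lst (list): The input list.
--         Returns:
--             float: The sum of the elements between the first and last negative elements.
--     '''
--     firstNegIndex = -1
--     lastNegIndex = -1
--     for i in range(len(lst)):
--         if lst[i] < 0:
--             if firstNegIndex == -1:
--                 firstNegIndex = i
--             lastNegIndex = i
--     if firstNegIndex == -1 or lastNegIndex == -1: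
--         return 0
--     else:
--         elemsSum = sum(lst[firstNegIndex+1:lastNegIndex])
--         return elemsSum
-- ===== SOURCE B (Python) =====
-- def SumOfElemsBetweenNegatives(lst: list) -> float:
--     stack = lst[::-1]              # front of lst at the top of the stack
--     while stack and stack[-1] >= 0:
--         stack.pop()                # discard leading non-negatives
--     if not stack:
--         return 0
--     stack.pop()                    # discard the first negative
--     stack.reverse()                # back of lst now at the top
--     while stack and stack[-1] >= 0:
--         stack.pop()                # discard trailing non-negatives
--     if not stack:
--         return 0
--     stack.pop()                    # discard the last negative
--     return sum(stack)
-- ===== Notes on version B (the rewrite author's own statement) =====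
-- stated objective: alternative
-- what changed: Replaces A's index-tracking scan plus slice by stack-style trimming: reverse the list and pop non-negative elements off the top, pop the first negative, reverse and pop trailing non-negatives, pop the last negative, and sum what remains - no indices at all.
import Mathlib
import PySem

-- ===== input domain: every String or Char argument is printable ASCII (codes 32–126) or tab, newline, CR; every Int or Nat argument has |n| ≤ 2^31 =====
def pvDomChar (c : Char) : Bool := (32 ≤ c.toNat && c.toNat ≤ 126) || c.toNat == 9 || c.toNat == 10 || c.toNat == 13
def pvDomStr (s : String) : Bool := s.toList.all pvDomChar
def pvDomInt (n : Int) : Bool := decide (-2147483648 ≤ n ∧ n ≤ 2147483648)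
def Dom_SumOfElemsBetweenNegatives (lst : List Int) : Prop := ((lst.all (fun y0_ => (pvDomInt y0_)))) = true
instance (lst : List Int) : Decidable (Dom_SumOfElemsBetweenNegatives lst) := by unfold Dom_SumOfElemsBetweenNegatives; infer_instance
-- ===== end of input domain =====

-- B replaces A's index-tracking scan by stack-style trimming: pop non-negative elements
-- off both ends (via reverse + pop) and sum the remaining middle (objective: alternative).


-- ===== PORT A =====
-- A's loop over range(len(lst)); lst[i] is always in range, so pyGetD is exact here.
def SumOfElemsBetweenNegatives (lst : List Int) : Int :=
  let st := (PySem.List.pyRange 0 (lst.length : Int) 1).foldl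
    (fun (st : Int × Int) i =>
      if PySem.List.pyGetD lst i 0 < 0 then
        ((if st.1 = -1 then i else st.1), i)
      else st) (-1, -1)
  if st.1 = -1 ∨ st.2 = -1 then 0
  else (PySem.List.slice lst (some (st.1 + 1)) (some st.2)).sum

-- ===== PORT B =====
-- B's pop loop 'while stack and stack[-1] >= 0: stack.pop()': the stack's top is the
-- list's END, so the loop inspects getLast? and drops the last element; it terminates
-- because each pop shortens the stack.
def pvPopLoop (stack : List Int) : List Int :=
  match h : stack.getLast? with
  | none => stack
  | some x => if 0 ≤ x then pvPopLoop stack.dropLast else stack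
termination_by stack.length
decreasing_by
  cases stack with
  | nil => simp at h
  | cons a l => simp [List.length_dropLast]

-- lst[::-1] is .reverse (PySem.List.slice?_none_none_neg_one); stack.pop() is .dropLast.
def SumOfElemsBetweenNegatives_alt (lst : List Int) : Int :=
  let stack0 := pvPopLoop lst.reverse
  if stack0 = [] then 0
  else
    let stack1 := pvPopLoop stack0.dropLast.reverse
    if stack1 = [] then 0
    else stack1.dropLast.sum

-- ===== PRECONDITION & SPEC =====
def Spec_SumOfElemsBetweenNegatives (lst : List Int) (out : Int) : Prop := out = SumOfElemsBetweenNegatives_alt lst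
instance (lst : List Int) (out : Int) : Decidable (Spec_SumOfElemsBetweenNegatives lst out) := by unfold Spec_SumOfElemsBetweenNegatives; infer_instance

-- ===== CLAIM (what is proved, stated in full; the proofs are below) =====
def Claim_equal_SumOfElemsBetweenNegatives : Prop := ∀ (lst : List Int), Dom_SumOfElemsBetweenNegatives lst → Spec_SumOfElemsBetweenNegatives lst (SumOfElemsBetweenNegatives lst)

-- ===== LEMMAS AND PROOFS =====

-- the loop body of A, as a fold over (index, value) pairs
def pvStep (st : Int × Int) (p : Int × Int) : Int × Int :=
  if p.2 < 0 then ((if st.1 = -1 then p.1 else st.1), p.1) else st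

-- characterization of A's fold state in terms of the list of negative indices,
-- for pair lists whose indices are all nonnegative
theorem pvFold_char (es : List (Int × Int))
    (h : ∀ p ∈ es, 0 ≤ p.1) :
    es.foldl pvStep (-1, -1) =
      (match (es.filter (fun p => decide (p.2 < 0))).map Prod.fst with
        | [] => ((-1 : Int), (-1 : Int))
        | i :: rest => (i, (i :: rest).getLastD 0)) := by
  induction es using List.reverseRecOn with
  | nil => simp
  | append_singleton es p ih =>
    have h' : ∀ q ∈ es, 0 ≤ q.1 := fun q hq => h q (List.mem_append_left _ hq)
    rw [List.foldl_append, ih h']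
    by_cases hp : p.2 < 0
    · cases hfe : (es.filter (fun q => decide (q.2 < 0))).map Prod.fst with
      | nil =>
        simp [pvStep, hp, List.filter_append, hfe]
      | cons i rest =>
        have hi : 0 ≤ i := by
          have : i ∈ (es.filter (fun q => decide (q.2 < 0))).map Prod.fst := by
            rw [hfe]; exact List.mem_cons_self
          obtain ⟨q, hq, rfl⟩ := List.mem_map.mp this
          exact h' q (List.mem_of_mem_filter hq)
        have hne : i ≠ -1 := by omega
        simp [pvStep, hp, List.filter_append, hfe, hne]
        rw [show i :: (rest ++ [p.1]) = (i :: rest) ++ [p.1] from rfl, List.getLast?_concat]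
        rfl
    · simp [pvStep, hp, List.filter_append]

-- A in terms of the list of negative-element indices
theorem pvA_eq_idx (lst : List Int) :
    SumOfElemsBetweenNegatives lst =
      (match ((PySem.List.enumerate lst 0).filter (fun p => decide (p.2 < 0))).map Prod.fst with
        | [] => 0
        | i :: rest => (PySem.List.slice lst (some (i + 1)) (some ((i :: rest).getLastD 0))).sum) := by
  unfold SumOfElemsBetweenNegatives
  have hen : PySem.List.enumerate lst 0 =
      (PySem.List.pyRange 0 (lst.length : Int) 1).map
        (fun j => (j, PySem.List.pyGetD lst j 0)) :=
    PySem.List.enumerate_eq_map_pyRange lst 0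
  have hfold : (PySem.List.pyRange 0 (lst.length : Int) 1).foldl
      (fun (st : Int × Int) i =>
        if PySem.List.pyGetD lst i 0 < 0 then
          ((if st.1 = -1 then i else st.1), i)
        else st) (-1, -1) = (PySem.List.enumerate lst 0).foldl pvStep (-1, -1) := by
    rw [hen, List.foldl_map]; rfl
  have hnn : ∀ p ∈ PySem.List.enumerate lst 0, 0 ≤ p.1 := by
    intro p hp
    obtain ⟨k, hk, rfl⟩ := (PySem.List.mem_enumerate_iff _ _ _).mp hp
    simp
  rw [hfold, pvFold_char _ hnn]
  cases hfe : ((PySem.List.enumerate lst 0).filter (fun p => decide (p.2 < 0))).map Prod.fst with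
  | nil => simp
  | cons i rest =>
    have hi : 0 ≤ i := by
      have : i ∈ ((PySem.List.enumerate lst 0).filter (fun p => decide (p.2 < 0))).map Prod.fst := by
        rw [hfe]; exact List.mem_cons_self
      obtain ⟨q, hq, rfl⟩ := List.mem_map.mp this
      exact hnn q (List.mem_of_mem_filter hq)
    have hlast : 0 ≤ rest.getLastD i := by
      have hm : rest.getLastD i ∈ ((PySem.List.enumerate lst 0).filter (fun p => decide (p.2 < 0))).map Prod.fst := by
        rw [hfe]; exact List.getLastD_mem_cons ..
      obtain ⟨q, hq, h2⟩ := List.mem_map.mp hm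
      rw [← h2]; exact hnn q (List.mem_of_mem_filter hq)
    have h1 : ¬ (i = -1 ∨ (i :: rest).getLastD 0 = -1) := by
      rw [List.getLastD_cons]; exact fun hc => by rcases hc with hc | hc <;> omega
    simp only [h1, if_false]

-- the pop loop pops the maximal non-negative suffix: it is dropWhile on the reverse
theorem pvPopLoop_eq (xs : List Int) :
    pvPopLoop xs = (xs.reverse.dropWhile (fun x => decide (0 ≤ x))).reverse := by
  induction xs using List.reverseRecOn with
  | nil => simp [pvPopLoop]
  | append_singleton xs x ih =>
    rw [pvPopLoop]
    split
    · rename_i h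
      simp at h
    · rename_i y h
      rw [List.getLast?_concat] at h
      obtain rfl : x = y := Option.some_inj.mp h
      rw [List.dropLast_concat]
      by_cases hx : 0 ≤ x
      · rw [if_pos hx, ih]
        simp [hx]
      · rw [if_neg hx]
        simp [hx]

-- B's value in terms of front/middle trimming by dropWhile
theorem pvAlt_char (lst : List Int) :
    SumOfElemsBetweenNegatives_alt lst =
      (let front := lst.dropWhile (fun x => decide (0 ≤ x));
       if front = [] then 0
       else
         let middle := front.tail.reverse.dropWhile (fun x => decide (0 ≤ x));
         if middle = [] then 0
         else middle.tail.sum) := by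
  unfold SumOfElemsBetweenNegatives_alt
  simp only [pvPopLoop_eq, List.reverse_reverse, List.reverse_eq_nil_iff,
    List.dropLast_reverse, List.sum_reverse]

-- the head surviving a dropWhile fails the predicate
theorem pvDropWhile_head {p : Int → Bool} {l : List Int} {x : Int} {xs : List Int}
    (h : l.dropWhile p = x :: xs) : p x = false := by
  induction l with
  | nil => simp at h
  | cons a l ih =>
    rw [List.dropWhile_cons] at h
    split at h
    · exact ih h
    · cases h; simpa using ‹¬ p x = true›

theorem pvGetLastD_concat (a m : Int) (l : List Int) :
    (a :: (l ++ [m])).getLastD 0 = m := by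
  rw [show a :: (l ++ [m]) = (a :: l) ++ [m] by simp, List.getLastD_eq_getLast?,
      List.getLast?_concat]
  rfl

-- a list of non-negative values contributes nothing to the negative-index list
theorem pvFilter_nil (xs : List Int) (s : Int) (h : ∀ x ∈ xs, 0 ≤ x) :
    (PySem.List.enumerate xs s).filter (fun p => decide (p.2 < 0)) = [] := by
  rw [List.filter_eq_nil_iff]
  intro p hp
  obtain ⟨k, hk, rfl⟩ := (PySem.List.mem_enumerate_iff _ _ _).mp hp
  simpa using h _ (xs.getElem_mem hk)

theorem SumOfElemsBetweenNegatives_eq (lst : List Int) :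
    SumOfElemsBetweenNegatives lst = SumOfElemsBetweenNegatives_alt lst := by
  rw [pvA_eq_idx]
  rcases hr : lst.dropWhile (fun x => decide (0 ≤ x)) with _ | ⟨n, rest⟩
  · -- no negative element: both sides are 0
    have hall : ∀ x ∈ lst, 0 ≤ x := by
      intro x hx
      simpa using List.dropWhile_eq_nil_iff.mp hr x hx
    rw [pvFilter_nil lst 0 hall, pvAlt_char, hr]
    simp
  · -- lst = t ++ n :: rest, n < 0, all of t non-negative
    have hn : n < 0 := by simpa using pvDropWhile_head hr
    have hB : SumOfElemsBetweenNegatives_alt lst =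
        (if rest.reverse.dropWhile (fun x => decide (0 ≤ x)) = [] then 0
         else (rest.reverse.dropWhile (fun x => decide (0 ≤ x))).tail.sum) := by
      rw [pvAlt_char]
      simp only [hr]
      simp
    rw [hB]
    have hsplit : lst = lst.takeWhile (fun x => decide (0 ≤ x)) ++ n :: rest := by
      conv_lhs => rw [← List.takeWhile_append_dropWhile (p := fun x => decide (0 ≤ x)) (l := lst)]
      rw [hr]
    set t := lst.takeWhile (fun x => decide (0 ≤ x)) with ht
    have htnn : ∀ x ∈ t, 0 ≤ x := fun x hx => by simpa using List.mem_takeWhile_imp hx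
    rw [show lst = t ++ n :: rest from hsplit, PySem.List.enumerate_append, List.filter_append,
        pvFilter_nil t 0 htnn, List.nil_append, PySem.List.enumerate_cons]
    simp only [List.filter_cons, show (decide (n < 0)) = true by simpa using hn, if_pos]
    rcases hd : rest.reverse.dropWhile (fun x => decide (0 ≤ x)) with _ | ⟨x, d'⟩
    · -- only one negative element: both sides are 0
      have hrest : ∀ y ∈ rest, 0 ≤ y := by
        intro y hy
        simpa using List.dropWhile_eq_nil_iff.mp hd y (List.mem_reverse.mpr hy)
      rw [pvFilter_nil rest _ hrest]
      simp only [List.map_cons, List.map_nil, List.getLastD_cons, List.getLastD_nil]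
      have hsl : PySem.List.slice (t ++ n :: rest)
          (some ((0 + (t.length : Int)) + 1)) (some (0 + (t.length : Int))) = [] := by
        rw [show (0 + (t.length : Int)) + 1 = ((t.length + 1 : Nat) : Int) by push_cast; ring,
            show (0 + (t.length : Int)) = ((t.length : Nat) : Int) by ring,
            PySem.List.slice_natCast]
        simp
      rw [hsl]
      simp
    · -- at least two negative elements
      have hx : x < 0 := by simpa using pvDropWhile_head hd
      set u' := rest.reverse.takeWhile (fun y => decide (0 ≤ y)) with hu'
      have hsp : u' ++ x :: d' = rest.reverse := by
        rw [hu', ← hd]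
        exact List.takeWhile_append_dropWhile ..
      have hunn : ∀ y ∈ u', 0 ≤ y := fun y hy => by simpa using List.mem_takeWhile_imp hy
      have hrsplit : rest = d'.reverse ++ x :: u'.reverse := by
        have h2 := congrArg List.reverse hsp
        rw [List.reverse_reverse] at h2
        rw [← h2]
        simp
      rw [show rest = d'.reverse ++ x :: u'.reverse from hrsplit, PySem.List.enumerate_append,
          List.filter_append, PySem.List.enumerate_cons, List.filter_cons,
          pvFilter_nil u'.reverse _ (fun y hy => hunn y (List.mem_reverse.mp hy))]
      simp only [show (decide (x < 0)) = true by simpa using hx, if_pos,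
        List.map_append, List.map_cons, List.map_nil]
      rw [pvGetLastD_concat]
      have hsl : PySem.List.slice (t ++ n :: (d'.reverse ++ x :: u'.reverse))
          (some ((0 + (t.length : Int)) + 1))
          (some (0 + (t.length : Int) + 1 + (d'.reverse.length : Int))) = d'.reverse := by
        rw [show 0 + (t.length : Int) + 1 + (d'.reverse.length : Int)
              = ((t.length + 1 + d'.reverse.length : Nat) : Int) by push_cast; ring,
            show (0 + (t.length : Int)) + 1 = ((t.length + 1 : Nat) : Int) by push_cast; ring,
            PySem.List.slice_natCast]
        rw [show t ++ n :: (d'.reverse ++ x :: u'.reverse)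
              = (t ++ [n]) ++ (d'.reverse ++ x :: u'.reverse) by simp,
            List.drop_append_of_le_length (by simp)]
        simp
      rw [hsl]
      simp

-- ===== VERDICT (by name: the statement is the Claim_ definition above) =====
theorem SumOfElemsBetweenNegatives_spec : Claim_equal_SumOfElemsBetweenNegatives := by
  intro lst _
  unfold Spec_SumOfElemsBetweenNegatives
  exact SumOfElemsBetweenNegatives_eq lst
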